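-- pv_equiv track=rewrite | github.com/lv10wizard/ig-highlights-bot | src/util/__init__.py | format_repeat_each_character_pattern
-- ===== SOURCE A (Python) =====
-- def format_repeat_each_character_pattern(text):
--     """
--     Returns a regex pattern matching the given text and any variation of it that
--             repeats any character. eg. 'blah' -> 'b+l+a+h+' => matches 'blaaaah'
--     """
--     # remove repeating characters
--     cleaned_text = []
--     seen = ''
--     for c in text:
--         c = c.lower()
--         if c != seen.lower():
--             cleaned_text.append(c)
--             seen = c
--     cleaned_text = ''.join(cleaned_text)
--
--     return ''.join( map(lambda c: '{0}+'.format(c), cleaned_text) )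
-- ===== SOURCE B (Python) =====
-- def format_repeat_each_character_pattern(text):
--     """
--     Returns a regex pattern matching the given text and any variation of it that
--             repeats any character. eg. 'blah' -> 'b+l+a+h+' => matches 'blaaaah'
--     """
--     # run-skipping scan: emit one "c+" per maximal case-insensitive run
--     out = []
--     i, n = 0, len(text)
--     while i < n:
--         k = text[i].lower()
--         out.append(k + '+')
--         i += 1
--         while i < n and text[i].lower() == k:
--             i += 1
--     return ''.join(out)
-- ===== Notes on version B (the rewrite author's own statement) =====
-- stated objective: simpler
-- what changed: Replaces A's two passes (dedup loop carrying a 'seen' string building cleaned_text, then a map adding the plus) with a single run-skipping scan that emits each lowered character followed by a plus sign once per case-insensitive run; the intermediate cleaned_text and the seen-state disappear.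
import Mathlib
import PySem

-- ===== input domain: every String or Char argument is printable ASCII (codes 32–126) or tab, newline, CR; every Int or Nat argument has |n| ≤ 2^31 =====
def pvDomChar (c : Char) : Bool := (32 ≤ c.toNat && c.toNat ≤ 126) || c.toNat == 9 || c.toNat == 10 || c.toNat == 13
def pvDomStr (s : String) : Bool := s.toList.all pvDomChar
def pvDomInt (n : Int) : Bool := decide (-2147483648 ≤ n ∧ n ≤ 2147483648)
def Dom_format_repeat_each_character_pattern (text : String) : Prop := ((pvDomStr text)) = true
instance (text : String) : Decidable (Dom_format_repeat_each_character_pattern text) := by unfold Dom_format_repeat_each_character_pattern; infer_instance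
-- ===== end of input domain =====

-- B replaces A's two passes (case-insensitive dedup into cleaned_text, then a map adding '+')
-- with one run-skipping scan emitting "c+" per run directly; objective: simpler.


-- ===== PORT A =====
-- loop: cleaned_text/seen accumulator over the characters; seen is a string ('' initially)
def pvAStep (st : List Char × List Char) (c : Char) : List Char × List Char :=
  let c := PySem.Chars.lowerChar c
  if [c] ≠ PySem.Chars.lower st.2 then (st.1 ++ [c], [c]) else st

def format_repeat_each_character_pattern (text : String) : String :=
  let st := text.toList.foldl pvAStep ([], [])
  String.mk (PySem.Chars.join [] (st.1.map (fun c => [c, '+'])))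

-- ===== PORT B =====
-- run-skipping scan: emit the lowered char and a plus, then skip the rest of the run
def pvBGo : List Char → List Char
  | [] => []
  | c :: rest =>
    let k := PySem.Chars.lowerChar c
    k :: '+' :: pvBGo (rest.dropWhile (fun d => PySem.Chars.lowerChar d == k))
termination_by l => l.length
decreasing_by
  exact Nat.lt_succ_of_le (List.length_dropWhile_le _ _)

def format_repeat_each_character_pattern_alt (text : String) : String :=
  String.mk (pvBGo text.toList)

-- ===== PRECONDITION & SPEC =====
def Spec_format_repeat_each_character_pattern (text : String) (out : String) : Prop := out = format_repeat_each_character_pattern_alt text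
instance (text : String) (out : String) : Decidable (Spec_format_repeat_each_character_pattern text out) := by unfold Spec_format_repeat_each_character_pattern; infer_instance

-- ===== CLAIM (what is proved, stated in full; the proofs are below) =====
def Claim_equal_format_repeat_each_character_pattern : Prop := ∀ (text : String), Dom_format_repeat_each_character_pattern text → Spec_format_repeat_each_character_pattern text (format_repeat_each_character_pattern text)

-- ===== LEMMAS AND PROOFS =====

lemma pv_lc_idem (c : Char) : PySem.Chars.lowerChar (PySem.Chars.lowerChar c) = PySem.Chars.lowerChar c := by
  simp only [PySem.Chars.lowerChar, PySem.Chars.isupper]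
  split_ifs with h1 h2 <;> try rfl
  exfalso
  simp only [Bool.and_eq_true, decide_eq_true_eq] at h1 h2
  obtain ⟨hA, hZ⟩ := h1
  have hA' : ('A':Char).toNat ≤ c.toNat := hA
  have hZ' : c.toNat ≤ ('Z':Char).toNat := hZ
  change 65 ≤ c.toNat at hA'
  change c.toNat ≤ 90 at hZ'
  have ht : (Char.ofNat (c.toNat + 32)).toNat = c.toNat + 32 := by
    rw [Char.ofNat, dif_pos]
    · rfl
    · exact Or.inl (by omega)
  have h2Z : (Char.ofNat (c.toNat + 32)).toNat ≤ ('Z':Char).toNat := h2.2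
  rw [ht] at h2Z
  change c.toNat + 32 ≤ 90 at h2Z
  omega

-- reference form of A's dedup loop once a (lowered) seen char k exists
def pvG : List Char → Char → List Char
  | [], _ => []
  | c :: l, k =>
    if PySem.Chars.lowerChar c = k then pvG l k
    else PySem.Chars.lowerChar c :: pvG l (PySem.Chars.lowerChar c)

lemma pvAStep_fold (l : List Char) : ∀ (acc : List Char) (k : Char),
    PySem.Chars.lowerChar k = k →
    (l.foldl pvAStep (acc, [k])).1 = acc ++ pvG l k := by
  induction l with
  | nil => intro acc k _; simp [pvG]
  | cons c l ih =>
    intro acc k hk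
    simp only [List.foldl_cons, pvG]
    by_cases h : PySem.Chars.lowerChar c = k
    · have : pvAStep (acc, [k]) c = (acc, [k]) := by
        simp [pvAStep, PySem.Chars.lower, h, hk]
      rw [this, if_pos h, ih acc k hk]
    · have : pvAStep (acc, [k]) c
          = (acc ++ [PySem.Chars.lowerChar c], [PySem.Chars.lowerChar c]) := by
        simp [pvAStep, PySem.Chars.lower, hk, h]
      rw [this, if_neg h, ih _ _ (pv_lc_idem c)]
      simp

-- joining ["c+", …] with empty separator prepends c :: '+'
lemma pv_join_plus (c : Char) (xs : List Char) :
    PySem.Chars.join [] ((c :: xs).map (fun c => [c, '+']))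
      = c :: '+' :: PySem.Chars.join [] (xs.map (fun c => [c, '+'])) := by
  cases xs with
  | nil => simp [PySem.Chars.join, List.intercalate]
  | cons d xs => simp [PySem.Chars.join, List.intercalate]

-- the dedup-then-join of A equals B's run-skipping scan
lemma pv_main (n : Nat) : ∀ (l : List Char), l.length ≤ n → ∀ (k : Char),
    PySem.Chars.lowerChar k = k →
    PySem.Chars.join [] ((k :: pvG l k).map (fun c => [c, '+']))
      = k :: '+' :: pvBGo (l.dropWhile (fun d => PySem.Chars.lowerChar d == k)) := by
  induction n with
  | zero =>
    intro l hl k _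
    have : l = [] := List.eq_nil_of_length_eq_zero (Nat.le_zero.mp hl)
    subst this
    simp [pvG, pvBGo]
  | succ n ih =>
    intro l hl k hk
    cases l with
    | nil => simp [pvG, pvBGo]
    | cons c l =>
      by_cases h : PySem.Chars.lowerChar c = k
      · have hdw : (c :: l).dropWhile (fun d => PySem.Chars.lowerChar d == k)
            = l.dropWhile (fun d => PySem.Chars.lowerChar d == k) := by
          simp [List.dropWhile, h]
        rw [hdw]
        have hg : pvG (c :: l) k = pvG l k := by simp [pvG, h]
        rw [hg]
        exact ih l (by simpa using Nat.le_of_succ_le_succ hl) k hk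
      · have hdw : (c :: l).dropWhile (fun d => PySem.Chars.lowerChar d == k) = c :: l := by
          simp only [List.dropWhile]
          rw [beq_eq_false_iff_ne.mpr h]
        rw [hdw]
        have hg : pvG (c :: l) k = PySem.Chars.lowerChar c :: pvG l (PySem.Chars.lowerChar c) := by
          simp [pvG, h]
        rw [hg, pv_join_plus]
        rw [ih l (by simpa using Nat.le_of_succ_le_succ hl) (PySem.Chars.lowerChar c) (pv_lc_idem c)]
        rw [pvBGo]

-- ===== VERDICT (by name: the statement is the Claim_ definition above) =====
theorem format_repeat_each_character_pattern_spec : Claim_equal_format_repeat_each_character_pattern := by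
  intro text _
  show _ = _
  unfold format_repeat_each_character_pattern format_repeat_each_character_pattern_alt
  cases hl : text.toList with
  | nil => simp [pvBGo, PySem.Chars.join, List.intercalate]
  | cons c l =>
    have hstep : pvAStep ([], []) c
        = ([PySem.Chars.lowerChar c], [PySem.Chars.lowerChar c]) := by
      simp [pvAStep, PySem.Chars.lower]
    simp only [List.foldl_cons, hstep]
    rw [pvAStep_fold l [PySem.Chars.lowerChar c] _ (pv_lc_idem c)]
    have := pv_main l.length l (le_refl _) (PySem.Chars.lowerChar c) (pv_lc_idem c)
    simp only [List.singleton_append]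
    rw [this, pvBGo]
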